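-- pv_equiv track=rewrite | github.com/Reidskar/NEXO_SOBERANO | backend/services/unified_sync_service.py | _build_learning_snapshot
-- ===== SOURCE A (Python) =====
-- from typing import Dict, List, Optional
-- from collections import Counter
--
-- def _build_learning_snapshot(result: Dict) -> Dict:
--     by_category = Counter()
--     by_bucket = Counter()
--     by_status = Counter()
--     by_country_or_conflict = Counter()
--     for source in ("google_photos", "google_drive", "onedrive", "youtube"):
--         for item in (result.get(source, {}).get("items") or []):
--             status = str(item.get("status") or "unknown")
--             by_status[status] += 1
--             category = item.get("category")
--             if category:
--                 by_category[str(category)] += 1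
--             bucket = item.get("conflict_bucket")
--             if bucket:
--                 by_bucket[str(bucket)] += 1
--                 by_country_or_conflict[str(bucket)] += 1
--     return {
--         "categories": dict(sorted(by_category.items(), key=lambda x: (-x[1], x[0]))),
--         "conflict_buckets": dict(sorted(by_bucket.items(), key=lambda x: (-x[1], x[0]))),
--         "country_or_conflict": dict(sorted(by_country_or_conflict.items(), key=lambda x: (-x[1], x[0]))),
--         "statuses": dict(sorted(by_status.items(), key=lambda x: (-x[1], x[0]))),
--     }
-- ===== SOURCE B (Python) =====
-- def _build_learning_snapshot(result):
--     # Dictionary-free counting: flatten the sources, then tally each field by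
--     # sorting its keys, run-length-encoding the sorted list, and ranking the
--     # runs by (-count, key); the bucket tally is computed once and reused.
--     items = [it
--              for src in ("google_photos", "google_drive", "onedrive", "youtube")
--              for it in (result.get(src, {}).get("items") or [])]
--
--     def runs(ks):
--         if not ks:
--             return []
--         n = 1
--         while n < len(ks) and ks[n] == ks[0]:
--             n += 1
--         return [(ks[0], n)] + runs(ks[n:])
--
--     def tally(keys):
--         rs = runs(sorted(keys))
--         rs.sort(key=lambda r: (-r[1], r[0]))
--         return dict(rs)
--
--     statuses = tally([str(it.get("status") or "unknown") for it in items])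
--     categories = tally([str(c) for it in items if (c := it.get("category"))])
--     buckets = tally([str(b) for it in items if (b := it.get("conflict_bucket"))])
--     return {
--         "categories": categories,
--         "conflict_buckets": buckets,
--         "country_or_conflict": dict(buckets),
--         "statuses": statuses,
--     }
-- ===== Notes on version B (the rewrite author's own statement) =====
-- stated objective: alternative
-- what changed: A's single nested pass threading four mutable Counters is replaced by a dictionary-free algorithm: flatten the sources, extract each field's key list, sort it, run-length-encode the sorted list into (key,count) runs, and sort the runs by (-count,key); the bucket tally is computed once since conflict_buckets and country_or_conflict are identical.
import Mathlib
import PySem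

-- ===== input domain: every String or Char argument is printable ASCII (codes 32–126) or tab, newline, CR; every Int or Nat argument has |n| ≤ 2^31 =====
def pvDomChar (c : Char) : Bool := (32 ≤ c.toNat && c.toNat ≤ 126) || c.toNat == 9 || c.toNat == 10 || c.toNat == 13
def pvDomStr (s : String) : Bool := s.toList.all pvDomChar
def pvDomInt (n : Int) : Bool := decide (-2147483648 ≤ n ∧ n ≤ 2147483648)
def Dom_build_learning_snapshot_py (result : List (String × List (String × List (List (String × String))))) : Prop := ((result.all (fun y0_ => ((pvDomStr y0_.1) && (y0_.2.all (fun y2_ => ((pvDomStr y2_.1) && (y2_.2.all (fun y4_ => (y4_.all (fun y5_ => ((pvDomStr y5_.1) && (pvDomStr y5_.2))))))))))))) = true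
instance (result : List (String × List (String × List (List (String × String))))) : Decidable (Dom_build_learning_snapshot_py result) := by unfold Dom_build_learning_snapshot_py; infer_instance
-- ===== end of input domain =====

-- B replaces A's nested pass over four mutable Counters by a dictionary-free
-- tally: flatten the sources, sort each field's key list, run-length-encode it,
-- and sort the runs by (-count, key); the bucket tally is computed only once.

-- shared transliterations of the Python dict primitives both versions use
-- item.get(k) on an item dict (first-match lookup per the assoc-list convention)
def pvGetStr (item : List (String × String)) (k : String) : Option String :=
  (PySem.Dict.mk item).get? k

-- result.get(src, {}).get("items") or []
def pvItems (result : List (String × List (String × List (List (String × String)))))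
    (src : String) : List (List (String × String)) :=
  match (PySem.Dict.mk result).get? src with
  | none => []
  | some d => ((PySem.Dict.mk d).get? "items").getD []

-- str(item.get("status") or "unknown")
def pvStatusKey (item : List (String × String)) : String :=
  match pvGetStr item "status" with
  | some s => if s = "" then "unknown" else s
  | none => "unknown"

-- ===== PORT A =====
-- the body of A's inner loop: one item updates the four counters in A's order
def pvStepA
    (st : PySem.Dict String Int × PySem.Dict String Int × PySem.Dict String Int × PySem.Dict String Int)
    (item : List (String × String)) :
    PySem.Dict String Int × PySem.Dict String Int × PySem.Dict String Int × PySem.Dict String Int :=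
  let (by_category, by_bucket, by_status, by_country_or_conflict) := st
  let status := pvStatusKey item
  let by_status := by_status.modify status 0 (· + 1)
  let by_category :=
    match pvGetStr item "category" with
    | some category => if category = "" then by_category else by_category.modify category 0 (· + 1)
    | none => by_category
  match pvGetStr item "conflict_bucket" with
  | some bucket =>
      if bucket = "" then (by_category, by_bucket, by_status, by_country_or_conflict)
      else (by_category, by_bucket.modify bucket 0 (· + 1), by_status,
            by_country_or_conflict.modify bucket 0 (· + 1))
  | none => (by_category, by_bucket, by_status, by_country_or_conflict)

def build_learning_snapshot_py (result : List (String × List (String × List (List (String × String))))) : List (String × List (String × Int)) :=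
  let st :=
    ["google_photos", "google_drive", "onedrive", "youtube"].foldl
      (fun st source => (pvItems result source).foldl pvStepA st)
      (PySem.Dict.empty, PySem.Dict.empty, PySem.Dict.empty, PySem.Dict.empty)
  let (by_category, by_bucket, by_status, by_country_or_conflict) := st
  [("categories", PySem.List.sorted2 by_category.items (fun x => -x.2) (fun x => x.1)),
   ("conflict_buckets", PySem.List.sorted2 by_bucket.items (fun x => -x.2) (fun x => x.1)),
   ("country_or_conflict", PySem.List.sorted2 by_country_or_conflict.items (fun x => -x.2) (fun x => x.1)),
   ("statuses", PySem.List.sorted2 by_status.items (fun x => -x.2) (fun x => x.1))]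

-- ===== PORT B =====
-- (c := item.get(k)) kept when truthy: the comprehension filters of B
def pvTruthyGet (item : List (String × String)) (k : String) : Option String :=
  match pvGetStr item k with
  | some s => if s = "" then none else some s
  | none => none

-- the inner 'while n < len(ks) and ks[n] == ks[0]' scan: length of the leading run of x
def pvLead (x : String) : List String → Nat
  | [] => 0
  | y :: t => if y = x then pvLead x t + 1 else 0

theorem pvLead_le (x : String) (t : List String) : pvLead x t ≤ t.length := by
  induction t with
  | nil => simp [pvLead]
  | cons y s ih => simp only [pvLead]; split <;> simp <;> omega

-- 'def runs(ks)' of B: run-length encoding, one (key, count) pair per leading run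
def pvRuns : List String → List (String × Int)
  | [] => []
  | x :: t =>
      (x, (1 + pvLead x t : Int)) :: pvRuns (t.drop (pvLead x t))
termination_by ks => ks.length
decreasing_by
  have := pvLead_le x t; simp only [List.length_drop, List.length_cons]; omega

-- 'def tally(keys)': sort, run-length-encode, rank the runs by (-count, key)
def pvTallyB (keys : List String) : List (String × Int) :=
  PySem.List.sorted2 (pvRuns (PySem.List.sorted keys (fun x => x) false))
    (fun r => -r.2) (fun r => r.1)

def build_learning_snapshot_py_alt (result : List (String × List (String × List (List (String × String))))) : List (String × List (String × Int)) :=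
  let items :=
    ["google_photos", "google_drive", "onedrive", "youtube"].flatMap (fun src => pvItems result src)
  let statuses := pvTallyB (items.map pvStatusKey)
  let categories := pvTallyB (items.filterMap (fun it => pvTruthyGet it "category"))
  let buckets := pvTallyB (items.filterMap (fun it => pvTruthyGet it "conflict_bucket"))
  [("categories", categories),
   ("conflict_buckets", buckets),
   ("country_or_conflict", buckets),
   ("statuses", statuses)]

-- ===== PRECONDITION & SPEC =====
def Spec_build_learning_snapshot_py (result : List (String × List (String × List (List (String × String))))) (out : List (String × List (String × Int))) : Prop := out = build_learning_snapshot_py_alt result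
instance (result : List (String × List (String × List (List (String × String))))) (out : List (String × List (String × Int))) : Decidable (Spec_build_learning_snapshot_py result out) := by unfold Spec_build_learning_snapshot_py; infer_instance

-- ===== CLAIM (what is proved, stated in full; the proofs are below) =====
def Claim_equal_build_learning_snapshot_py : Prop := ∀ (result : List (String × List (String × List (List (String × String))))), Dom_build_learning_snapshot_py result → Spec_build_learning_snapshot_py result (build_learning_snapshot_py result)

-- ===== LEMMAS AND PROOFS =====

-- A's one four-accumulator pass over any item list is the four per-field counting folds
theorem foldl_stepA (items : List (List (String × String)))
    (bc bb bs bcc : PySem.Dict String Int) :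
    items.foldl pvStepA (bc, bb, bs, bcc) =
      ((items.filterMap (fun it => pvTruthyGet it "category")).foldl
          (fun d x => d.modify x 0 (· + 1)) bc,
       (items.filterMap (fun it => pvTruthyGet it "conflict_bucket")).foldl
          (fun d x => d.modify x 0 (· + 1)) bb,
       (items.map pvStatusKey).foldl (fun d x => d.modify x 0 (· + 1)) bs,
       (items.filterMap (fun it => pvTruthyGet it "conflict_bucket")).foldl
          (fun d x => d.modify x 0 (· + 1)) bcc) := by
  induction items generalizing bc bb bs bcc with
  | nil => simp
  | cons it tl ih =>
    simp only [List.foldl_cons, List.map_cons, List.filterMap_cons, pvStepA]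
    rcases hc : pvGetStr it "category" with _ | c <;>
      rcases hb : pvGetStr it "conflict_bucket" with _ | b <;>
      simp only [hc, hb] <;> (try split_ifs) <;> simp_all [ih, pvTruthyGet]

-- Python's two-key sort IS the one-key sort under the lexicographic order on pairs
theorem sorted2_eq_sorted_lex {α : Type} (xs : List α) (k1 : α → Int) (k2 : α → String) :
    PySem.List.sorted2 xs k1 k2 =
      PySem.List.sorted xs (fun x => toLex (k1 x, k2 x)) false := by
  have hbef : (fun a b => decide (k1 a < k1 b) || (!decide (k1 b < k1 a) && decide (k2 a < k2 b)))
      = fun a b => decide (toLex (k1 a, k2 a) < toLex (k1 b, k2 b)) := by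
    funext a b
    simp only [Prod.Lex.toLex_lt_toLex]
    by_cases h1 : k1 a < k1 b
    · simp [h1]
    · by_cases h2 : k1 b < k1 a
      · simp [h1, h2, ne_of_gt h2]
      · have he : k1 a = k1 b := le_antisymm (not_lt.mp h2) (not_lt.mp h1)
        simp [h1, h2, he]
  rw [PySem.List.sorted_eq_foldl_insertBy]
  simp only [PySem.List.sorted2, Bool.false_eq_true, if_false, hbef]

theorem pvLead_take (x : String) (t : List String) :
    t.take (pvLead x t) = List.replicate (pvLead x t) x := by
  induction t with
  | nil => simp [pvLead]
  | cons y s ih =>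
    simp only [pvLead]; split
    · next h => simp [List.replicate_succ, h, ih]
    · simp

theorem pvLead_drop_gt (x : String) (t : List String)
    (hs : t.Pairwise (· ≤ ·)) (hx : ∀ y ∈ t, x ≤ y) :
    ∀ y ∈ t.drop (pvLead x t), x < y := by
  induction t with
  | nil => simp [pvLead]
  | cons z s ih =>
    rcases List.pairwise_cons.mp hs with ⟨hz, hs'⟩
    simp only [pvLead]; split
    · next h =>
      subst h
      exact ih hs' (fun y hy => le_trans (hx z (by simp)) (hz y hy))
    · next h =>
      intro y hy
      simp only [List.drop_zero] at hy
      rcases List.mem_cons.mp hy with rfl | hy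
      · exact lt_of_le_of_ne (hx y (by simp)) (fun he => h he.symm)
      · exact lt_of_lt_of_le (lt_of_le_of_ne (hx z (by simp)) (fun he => h he.symm)) (hz y hy)

-- membership in the run-length encoding of a sorted list = (element, its count)
theorem mem_pvRuns (m : List String) (hs : m.Pairwise (· ≤ ·)) (k : String) (c : Int) :
    (k, c) ∈ pvRuns m ↔ k ∈ m ∧ c = (m.count k : Int) := by
  induction m using pvRuns.induct with
  | case1 => simp [pvRuns]
  | case2 x t ih =>
    have hx : ∀ y ∈ t, x ≤ y := (List.pairwise_cons.mp hs).1
    have hs' : t.Pairwise (· ≤ ·) := (List.pairwise_cons.mp hs).2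
    have hsd : (t.drop (pvLead x t)).Pairwise (· ≤ ·) := hs'.sublist (List.drop_sublist _ _)
    have hgt := pvLead_drop_gt x t hs' hx
    have hxd : x ∉ t.drop (pvLead x t) := fun hm => lt_irrefl x (hgt x hm)
    have hsplit : x :: t = (x :: List.replicate (pvLead x t) x) ++ t.drop (pvLead x t) := by
      rw [List.cons_append, ← pvLead_take x t, List.take_append_drop]
    have hcx : (x :: t).count x = pvLead x t + 1 := by
      rw [hsplit]
      simp [List.count_append, List.count_eq_zero.mpr hxd]
    have hck : ∀ k' : String, k' ≠ x → (x :: t).count k' = (t.drop (pvLead x t)).count k' := by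
      intro k' hne
      rw [hsplit]
      simp [List.count_append, List.count_replicate, Ne.symm hne]
    have hmemk : ∀ k' : String, k' ≠ x → (k' ∈ x :: t ↔ k' ∈ t.drop (pvLead x t)) := by
      intro k' hne
      rw [hsplit]
      simp [List.mem_append, List.mem_cons, List.mem_replicate, hne]
    rw [pvRuns]
    simp only [List.mem_cons, Prod.mk.injEq]
    constructor
    · rintro (⟨rfl, rfl⟩ | h)
      · exact ⟨Or.inl rfl, by rw [hcx]; push_cast; ring⟩
      · obtain ⟨hk, rfl⟩ := (ih hsd).mp h
        have hne : k ≠ x := ne_of_gt (hgt k hk)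
        exact ⟨List.mem_cons.mp ((hmemk k hne).mpr hk), by rw [hck k hne]⟩
    · rintro ⟨hk, rfl⟩
      by_cases he : k = x
      · subst he
        exact Or.inl ⟨rfl, by rw [hcx]; push_cast; ring⟩
      · exact Or.inr ((ih hsd).mpr ⟨(hmemk k he).mp (List.mem_cons.mpr hk), by rw [hck k he]⟩)

-- the keys of the run-length encoding of a sorted list are strictly increasing
theorem pvRuns_keys_lt (m : List String) (hs : m.Pairwise (· ≤ ·)) :
    (pvRuns m).Pairwise (fun a b => a.1 < b.1) := by
  induction m using pvRuns.induct with
  | case1 => simp [pvRuns]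
  | case2 x t ih =>
    rcases List.pairwise_cons.mp hs with ⟨hx, hs'⟩
    have hsd : (t.drop (pvLead x t)).Pairwise (· ≤ ·) := hs'.sublist (List.drop_sublist _ _)
    have hgt := pvLead_drop_gt x t hs' hx
    rw [pvRuns]
    refine List.pairwise_cons.mpr ⟨?_, ih hsd⟩
    intro p hp
    have := (mem_pvRuns _ hsd p.1 p.2).mp (by simpa using hp)
    exact hgt p.1 this.1

theorem pvRuns_nodup (m : List String) (hs : m.Pairwise (· ≤ ·)) : (pvRuns m).Nodup :=
  (pvRuns_keys_lt m hs).imp (fun h => by rintro rfl; exact lt_irrefl _ h)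

-- counter items: membership and nodup
theorem mem_counter_items (L : List String) (k : String) (c : Int) :
    (k, c) ∈ (PySem.Dict.counter L).items ↔ k ∈ L ∧ c = (L.count k : Int) := by
  rw [PySem.Dict.items_counter]
  simp only [List.mem_map]
  constructor
  · rintro ⟨k', hk', he⟩
    obtain ⟨rfl, rfl⟩ := Prod.ext_iff.mp he
    exact ⟨(PySem.Set.mem_ofList _ _).mp hk', rfl⟩
  · rintro ⟨hk, rfl⟩
    exact ⟨k, (PySem.Set.mem_ofList _ _).mpr hk, rfl⟩

theorem counter_items_nodup (L : List String) : (PySem.Dict.counter L).items.Nodup := by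
  rw [PySem.Dict.items_counter]
  exact (PySem.Set.nodup_ofList L).map (fun a b he => (Prod.ext_iff.mp he).1)

-- the run-length encoding of sorted(L) is a permutation of Counter(L).items()
theorem pvRuns_perm_counter (L : List String) :
    (pvRuns (PySem.List.sorted L (fun x => x) false)).Perm (PySem.Dict.counter L).items := by
  have hs : (PySem.List.sorted L (fun x => x) false).Pairwise (· ≤ ·) :=
    PySem.List.sorted_pairwise L (fun x => x)
  have hperm : (PySem.List.sorted L (fun x => x) false).Perm L :=
    PySem.List.sorted_perm L (fun x => x) false
  rw [List.perm_ext_iff_of_nodup (pvRuns_nodup _ hs) (counter_items_nodup L)]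
  rintro ⟨k, c⟩
  rw [mem_pvRuns _ hs, mem_counter_items, hperm.mem_iff, hperm.count_eq]

-- the central fact: B's sort-and-RLE tally equals A's ranked Counter
theorem tally_eq (L : List String) :
    PySem.List.sorted2 (PySem.Dict.counter L).items (fun x => -x.2) (fun x => x.1) =
      pvTallyB L := by
  rw [pvTallyB, sorted2_eq_sorted_lex, sorted2_eq_sorted_lex]
  exact PySem.List.sorted_eq_sorted_of_perm _ _ _
    (fun a b he => by
      have h := Prod.ext_iff.mp (toLex_inj.mp he)
      exact Prod.ext_iff.mpr ⟨h.2, by have := h.1; omega⟩)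
    ((pvRuns_perm_counter L).symm)

-- ===== VERDICT (by name: the statement is the Claim_ definition above) =====
theorem build_learning_snapshot_py_spec : Claim_equal_build_learning_snapshot_py := by
  intro result _
  show _ = _
  simp only [build_learning_snapshot_py, build_learning_snapshot_py_alt,
    List.foldl_cons, List.foldl_nil, List.flatMap_cons, List.flatMap_nil, List.append_nil,
    List.filterMap_append, List.map_append,
    ← List.foldl_append, ← List.append_assoc, foldl_stepA]
  simp only [← PySem.Dict.counter_eq_foldl, tally_eq]
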